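/- GENERATED by farm/mkstatement.py from design/units.tsv (unit `arena_temp_restore`) and the Specs of Vorbis/Spec/*.lean — do not edit.
   THE STATEMENT of the proof unit `arena_temp_restore`: the function `arena_temp_restore` (29 instructions) satisfies its contract,
   given the contracts of its callees. What the names mean: Vorbis/Spec/Basic.lean. The theorem to prove:
   `theorem arena_temp_restore_ok : Vorbis.Spec.arena_temp_restore.Statement`. -/
import Vorbis.Spec.Alloc
import Vorbis.Spec.Runtime
namespace Vorbis.Spec.arena_temp_restore
open X86 X86.User Asan

/-- The statement of unit `arena_temp_restore`. -/
def Statement : Prop :=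
  ∀ (Lay : Layout) (_hLay : Lay.hi = 0x1000000) (μ : Microarch) (_hμ : UserX.MicroOK μ) (u₀ : State)
    (_hcode : HasCodeNat Lay u₀ Vorbis.L.arena_temp_restore.entry Vorbis.Code.code_arena_temp_restore.nat Vorbis.L.arena_temp_restore.size)
    (_h_asan_load8_noabort : Asan.SmallCheck Lay μ Vorbis.WayInv (Vorbis.CodeOK u₀) [.rax, .rcx, .rdx] 8 Vorbis.L.__asan_load8_noabort.entry)
    (_h_asan_load4_noabort : Asan.SmallCheck Lay μ Vorbis.WayInv (Vorbis.CodeOK u₀) [.rax, .rcx, .rdx] 4 Vorbis.L.__asan_load4_noabort.entry)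
    (_h_arena_poison : Calls Lay μ Vorbis.WayInv (Vorbis.conv u₀) Vorbis.L.arena_poison.entry Asan.arenaPoisonSpec)
    (_h_asan_store4_noabort : Asan.SmallCheck Lay μ Vorbis.WayInv (Vorbis.CodeOK u₀) [.rax, .rcx, .rdx] 4 Vorbis.L.__asan_store4_noabort.entry),
    ∀ (others : List Obj) (frames : List (Nat × FrameLayout)) (A : Arena) (dead keep : List (Nat × Nat)), Calls Lay μ Vorbis.WayInv (Vorbis.conv u₀) Vorbis.L.arena_temp_restore.entry (Vorbis.Spec.arena_temp_restore.spec others frames A dead keep)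

end Vorbis.Spec.arena_temp_restore
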